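-- pv_equiv track=rewrite | github.com/Shashank2125/CodePush | 7-kyu/lost-lineup/lost-lineup.py | find_lineup
-- ===== SOURCE A (Python) =====
-- def find_lineup(distances):
--     n=len(distances)
--     res=[-1]*n
--     for i in range(n):
--         pos=distances[i]
--         #postion must be valid
--         if pos<0 or pos>=n:
--             return []
--         #if position is already taken Impossible
--         if res[pos]!=-1:
--             return []
--         #place the person at thier postion
--         res[pos]=i+1
--     return res
--     pass
-- ===== SOURCE B (Python) =====
-- def find_lineup(distances):
--     n = len(distances)
--     if sorted(distances) != list(range(n)):
--         return []
--     res = [0] * n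
--     for i, d in enumerate(distances):
--         res[d] = i + 1
--     return res
-- ===== Notes on version B (the rewrite author's own statement) =====
-- stated objective: simpler
-- what changed: A validates bounds and duplicates inside one interleaved place-and-check loop over a -1-sentinel array; B validates up front in one shot (sorted(distances) == range(n)) and then builds the inverse permutation in a separate plain placement pass with no sentinel.
import Mathlib
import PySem

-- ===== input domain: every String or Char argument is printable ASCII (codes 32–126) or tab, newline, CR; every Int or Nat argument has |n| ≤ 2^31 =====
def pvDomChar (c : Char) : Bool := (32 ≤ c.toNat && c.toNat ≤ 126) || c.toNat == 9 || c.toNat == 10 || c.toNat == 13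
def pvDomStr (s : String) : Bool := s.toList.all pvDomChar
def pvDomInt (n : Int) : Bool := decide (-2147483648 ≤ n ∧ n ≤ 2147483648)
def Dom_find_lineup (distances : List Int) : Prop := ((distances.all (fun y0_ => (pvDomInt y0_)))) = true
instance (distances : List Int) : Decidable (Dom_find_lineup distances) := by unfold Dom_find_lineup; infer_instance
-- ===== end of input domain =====

-- B validates up front (sorted(distances) == range(n)) and then places in a plain
-- second pass, instead of A's interleaved place-and-check loop over a -1 sentinel array.

-- ===== PORT A =====
-- A's loop: for i in range(n): pos=distances[i]; bounds check, taken check, place i+1.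
def pvALoop (n : Nat) (ds : List Int) (i : Int) (res : List Int) : List Int :=
  match ds with
  | [] => res
  | d :: ds' =>
    if d < 0 ∨ (n : Int) ≤ d then []
    else if res.getD d.toNat 0 ≠ -1 then []
    else pvALoop n ds' (i + 1) (res.set d.toNat (i + 1))

def find_lineup (distances : List Int) : List Int :=
  pvALoop distances.length distances 0 (List.replicate distances.length (-1))

-- ===== PORT B =====
-- for i, d in enumerate(distances): res[d] = i + 1
def pvPlace (ds : List Int) (i : Int) (res : List Int) : List Int :=
  match ds with
  | [] => res
  | d :: ds' => pvPlace ds' (i + 1) (res.set d.toNat (i + 1))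

def find_lineup_alt (distances : List Int) : List Int :=
  let n := distances.length
  if PySem.List.sorted distances (fun x => x) false = (List.range n).map Int.ofNat then
    pvPlace distances 0 (List.replicate n 0)
  else []

-- ===== PRECONDITION & SPEC =====
def Spec_find_lineup (distances : List Int) (out : List Int) : Prop := out = find_lineup_alt distances
instance (distances : List Int) (out : List Int) : Decidable (Spec_find_lineup distances out) := by unfold Spec_find_lineup; infer_instance

-- ===== CLAIM (what is proved, stated in full; the proofs are below) =====
def Claim_equal_find_lineup : Prop := ∀ (distances : List Int), Dom_find_lineup distances → Spec_find_lineup distances (find_lineup distances)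

-- ===== LEMMAS AND PROOFS =====

theorem map_toNat_map_ofNat (m : Nat) :
    ((List.range m).map Int.ofNat).map Int.toNat = List.range m := by
  simp [Function.comp_def]

-- A's loop succeeds (and equals the plain placement pass) when every remaining
-- distance is in range, distances are pairwise distinct, and their cells are still -1.
theorem pvALoop_success (n : Nat) (ds : List Int) (i : Int) (res : List Int)
    (hr : ∀ d ∈ ds, 0 ≤ d ∧ d < (n : Int))
    (hn : (ds.map Int.toNat).Nodup)
    (hv : ∀ d ∈ ds, res.getD d.toNat 0 = -1) :
    pvALoop n ds i res = pvPlace ds i res := by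
  induction ds generalizing i res with
  | nil => rfl
  | cons d ds' ih =>
    have hd := hr d (by simp)
    have hvd := hv d (by simp)
    rw [List.map_cons, List.nodup_cons] at hn
    simp only [pvALoop, pvPlace]
    rw [if_neg (by omega), if_neg (by simpa [List.getD] using hvd)]
    apply ih
    · exact fun e he => hr e (by simp [he])
    · exact hn.2
    · intro e he
      have hne : e.toNat ≠ d.toNat := fun h => hn.1 (List.mem_map.mpr ⟨e, he, h⟩)
      rw [List.getD, List.getElem?_set_ne (by omega)]
      exact hv e (by simp [he])

-- A's loop fails (returns []) when the success condition is violated.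
theorem pvALoop_fail (n : Nat) (ds : List Int) (i : Int) (res : List Int)
    (hi : 0 ≤ i) (hlen : res.length = n)
    (hbad : ¬ ((∀ d ∈ ds, 0 ≤ d ∧ d < (n : Int)) ∧ (ds.map Int.toNat).Nodup ∧
              (∀ d ∈ ds, res.getD d.toNat 0 = -1))) :
    pvALoop n ds i res = [] := by
  induction ds generalizing i res with
  | nil => exact absurd ⟨by simp, by simp, by simp⟩ hbad
  | cons d ds' ih =>
    simp only [pvALoop]
    split
    · rfl
    · rename_i hrange
      split
      · rfl
      · rename_i htaken
        have hd : 0 ≤ d ∧ d < (n : Int) := by omega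
        have hvd : res.getD d.toNat 0 = -1 := by simpa [List.getD] using htaken
        apply ih (i + 1) _ (by omega) (by simpa using hlen)
        rintro ⟨hr', hn', hv'⟩
        -- d.toNat is not hit again in ds'
        have hnotin : d.toNat ∉ ds'.map Int.toNat := by
          intro hmem
          rcases List.mem_map.mp hmem with ⟨e, he, hee⟩
          have := hv' e he
          rw [List.getD, hee, List.getElem?_set_self (by omega)] at this
          simp at this; omega
        refine hbad ⟨?_, ?_, ?_⟩
        · intro e he
          rcases List.mem_cons.mp he with h | h
          · exact h ▸ hd
          · exact hr' e h
        · rw [List.map_cons, List.nodup_cons]; exact ⟨hnotin, hn'⟩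
        · intro e he
          rcases List.mem_cons.mp he with h | h
          · exact h ▸ hvd
          · have hne : e.toNat ≠ d.toNat := fun h' => hnotin (List.mem_map.mpr ⟨e, h, h'⟩)
            have := hv' e h
            rwa [List.getD, List.getElem?_set_ne (by omega)] at this

-- The placement pass gives the same result from two start arrays that agree
-- outside the positions being written.
theorem pvPlace_congr (ds : List Int) (i : Int) (res1 res2 : List Int)
    (hlen : res1.length = res2.length)
    (hagree : ∀ k, k < res1.length → k ∈ ds.map Int.toNat ∨ res1.getD k 0 = res2.getD k 0) :
    pvPlace ds i res1 = pvPlace ds i res2 := by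
  induction ds generalizing i res1 res2 with
  | nil =>
    apply List.ext_getElem hlen
    intro k h1 h2
    rcases hagree k h1 with h | h
    · exact absurd h (by simp)
    · rwa [List.getD, List.getD, List.getElem?_eq_getElem h1, List.getElem?_eq_getElem h2,
        Option.getD_some, Option.getD_some] at h
  | cons d ds' ih =>
    simp only [pvPlace]
    apply ih
    · simp [hlen]
    · intro k hk
      simp only [List.length_set] at hk
      by_cases hkd : k = d.toNat
      · by_cases hkr : d.toNat < res1.length
        · right
          rw [List.getD, List.getD, hkd, List.getElem?_set_self hkr,
            List.getElem?_set_self (hlen ▸ hkr)]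
        · exact absurd hk (by omega)
      · rcases hagree k hk with h | h
        · rcases List.mem_map.mp h with ⟨e, he, hee⟩
          rcases List.mem_cons.mp he with h' | h'
          · exact absurd (by rw [← hee, h']) hkd
          · exact Or.inl (List.mem_map.mpr ⟨e, h', hee⟩)
        · right
          rwa [List.getD, List.getD, List.getElem?_set_ne (Ne.symm hkd),
            List.getElem?_set_ne (Ne.symm hkd)]

theorem range_map_pairwise (n : Nat) :
    ((List.range n).map Int.ofNat).Pairwise (fun a b : Int => a < b) :=
  List.pairwise_lt_range.map Int.ofNat (fun _ _ h => Int.ofNat_lt.mpr h)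

-- The success condition makes distances a permutation of range(n) as ints, and conversely.
theorem perm_of_cond (ds : List Int)
    (hr : ∀ d ∈ ds, 0 ≤ d ∧ d < (ds.length : Int))
    (hn : (ds.map Int.toNat).Nodup) :
    ds.Perm ((List.range ds.length).map Int.ofNat) := by
  have hsub : (ds.map Int.toNat) ⊆ List.range ds.length := by
    intro k hk
    rcases List.mem_map.mp hk with ⟨e, he, hee⟩
    have := hr e he
    exact List.mem_range.mpr (by omega)
  have hperm : (ds.map Int.toNat).Perm (List.range ds.length) :=
    (List.subperm_of_subset hn hsub).perm_of_length_le (by simp)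
  have hid : (ds.map Int.toNat).map Int.ofNat = ds := by
    rw [List.map_map]
    have h1 : ds.map (Int.ofNat ∘ Int.toNat) = ds.map id :=
      List.map_congr_left (fun e he => Int.toNat_of_nonneg (hr e he).1)
    rw [h1, List.map_id]
  have h := hperm.map Int.ofNat
  rwa [hid] at h

theorem cond_of_perm (ds : List Int)
    (hp : ds.Perm ((List.range ds.length).map Int.ofNat)) :
    (∀ d ∈ ds, 0 ≤ d ∧ d < (ds.length : Int)) ∧ (ds.map Int.toNat).Nodup := by
  constructor
  · intro d hd
    rcases List.mem_map.mp (hp.mem_iff.mp hd) with ⟨k, hk, hkd⟩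
    have hkr := List.mem_range.mp hk
    subst hkd
    simp only [Int.ofNat_eq_natCast]
    omega
  · have h := hp.map Int.toNat
    rw [map_toNat_map_ofNat] at h
    exact h.nodup_iff.mpr List.nodup_range

-- ===== VERDICT (by name: the statement is the Claim_ definition above) =====
theorem find_lineup_spec : Claim_equal_find_lineup := by
  intro ds _
  unfold Spec_find_lineup find_lineup find_lineup_alt
  set n := ds.length with hn
  by_cases hs : PySem.List.sorted ds (fun x => x) false = (List.range n).map Int.ofNat
  · simp only [hs, if_pos]
    have hperm : ds.Perm ((List.range n).map Int.ofNat) :=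
      (PySem.List.sorted_perm ds (fun x => x) false).symm.trans (hs ▸ List.Perm.refl _)
    obtain ⟨hr, hnd⟩ := cond_of_perm ds hperm
    rw [pvALoop_success n ds 0 _ hr hnd]
    · apply pvPlace_congr _ _ _ _ (by simp)
      intro k hk
      left
      have h := hperm.map Int.toNat
      rw [map_toNat_map_ofNat] at h
      apply h.mem_iff.mpr
      simp only [List.length_replicate] at hk
      exact List.mem_range.mpr hk
    · intro d hd
      have := hr d hd
      simp [List.getD, List.getElem?_replicate, if_pos (show d.toNat < n by omega)]
  · rw [if_neg hs]
    apply pvALoop_fail n ds 0 _ le_rfl (by simp)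
    rintro ⟨hr, hnd, -⟩
    have hperm := perm_of_cond ds hr hnd
    exact hs (PySem.List.sorted_eq_of_perm_of_pairwise_lt ds ((List.range n).map Int.ofNat) (fun x => x) hperm.symm (range_map_pairwise n))
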